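-- pv_equiv track=rewrite | github.com/cambridgeltl/zepo | pairs/full_preference_matrix.py | pairwise_non_diagonal_to_list
-- ===== SOURCE A (Python) =====
-- def pairwise_non_diagonal_to_list(size):
--     '''
--     Convert a Square pairwise matrix to a list of non-diagonal elements
--     '''
--     rows, cols = size, size
--     result = []
--     for i in range(rows):
--         for j in range(cols):
--             if i != j:  # Check if the element is not on the diagonal
--                 result.append((i, j))
--     return result
-- ===== SOURCE B (Python) =====
-- def pairwise_non_diagonal_to_list(size):
--     '''
--     Convert a Square pairwise matrix to a list of non-diagonal elements
--     '''
--     if size < 2: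
--         return []
--     n1 = size - 1
--     out = []
--     for k in range(size * n1):
--         i, r = divmod(k, n1)
--         out.append((i, r) if r < i else (i, r + 1))
--     return out
-- ===== Notes on version B (the rewrite author's own statement) =====
-- stated objective: alternative
-- what changed: Instead of nested loops with an i!=j test, B runs a single flat loop over k in range(size*(size-1)) and decodes each pair arithmetically: i, r = divmod(k, size-1) and the column is r when r < i, else r+1 (skipping the diagonal by index arithmetic rather than by comparison).
import Mathlib
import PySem

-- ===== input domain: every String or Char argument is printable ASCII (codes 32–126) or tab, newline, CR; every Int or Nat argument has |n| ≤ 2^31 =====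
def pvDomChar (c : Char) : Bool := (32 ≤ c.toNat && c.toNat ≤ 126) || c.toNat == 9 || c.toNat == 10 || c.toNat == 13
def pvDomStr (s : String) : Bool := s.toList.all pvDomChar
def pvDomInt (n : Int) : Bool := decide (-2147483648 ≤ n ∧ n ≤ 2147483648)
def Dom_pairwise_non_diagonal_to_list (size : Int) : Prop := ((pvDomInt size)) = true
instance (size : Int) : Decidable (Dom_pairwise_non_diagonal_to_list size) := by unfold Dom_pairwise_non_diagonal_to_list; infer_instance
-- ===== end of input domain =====

-- B replaces the nested loops by one flat loop over k < size*(size-1), decoding (i, j) by divmod; equal return value for every size.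

-- ===== PORT A =====
-- literal transliteration of A: nested loops over range(size), appending (i, j) when i != j
def pairwise_non_diagonal_to_list (size : Int) : List (Int × Int) :=
  (PySem.List.pyRange 0 size 1).foldl (fun result i =>
    (PySem.List.pyRange 0 size 1).foldl (fun result j =>
      if i ≠ j then result ++ [(i, j)] else result) result) []

-- ===== PORT B =====
-- B: guard size < 2, then one flat loop over range(size*(size-1)); i, r = divmod(k, size-1),
-- append (i, r) if r < i else (i, r+1)
def pairwise_non_diagonal_to_list_alt (size : Int) : List (Int × Int) :=
  if size < 2 then []
  else
    (PySem.List.pyRange 0 (size * (size - 1)) 1).foldl (fun out k =>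
      let i := PySem.Int.floordiv k (size - 1)
      let r := PySem.Int.mod k (size - 1)
      out ++ [if r < i then (i, r) else (i, r + 1)]) []

-- ===== PRECONDITION & SPEC =====
def Spec_pairwise_non_diagonal_to_list (size : Int) (out : List (Int × Int)) : Prop :=
  out = pairwise_non_diagonal_to_list_alt size
instance (size : Int) (out : List (Int × Int)) : Decidable (Spec_pairwise_non_diagonal_to_list size out) := by
  unfold Spec_pairwise_non_diagonal_to_list; infer_instance

-- ===== CLAIM =====
def Claim_equal_pairwise_non_diagonal_to_list : Prop :=
  ∀ (size : Int), Dom_pairwise_non_diagonal_to_list size →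
    Spec_pairwise_non_diagonal_to_list size (pairwise_non_diagonal_to_list size)

-- ===== LEMMAS AND PROOFS =====

-- inner loop of A: appending under the i ≠ j test is filtering then mapping
theorem pnd_inner (i : Int) (l : List Int) (acc : List (Int × Int)) :
    l.foldl (fun result j => if i ≠ j then result ++ [(i, j)] else result) acc
      = acc ++ (l.filter (fun j => j ≠ i)).map (fun j => (i, j)) := by
  induction l generalizing acc with
  | nil => simp
  | cons x xs ih =>
    rw [List.foldl_cons]
    by_cases h : i = x
    · rw [if_neg (by simp [h]), ih, List.filter_cons]
      simp [h]
    · rw [if_pos h, ih, List.filter_cons]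
      simp [Ne.symm h]

-- outer loop of A: flatMap of the filtered-and-mapped inner results
theorem pnd_outer (r2 r : List Int) (acc : List (Int × Int)) :
    r.foldl (fun result i =>
        r2.foldl (fun result j => if i ≠ j then result ++ [(i, j)] else result) result) acc
      = acc ++ r.flatMap (fun i => (r2.filter (fun j => j ≠ i)).map (fun j => (i, j))) := by
  induction r generalizing acc with
  | nil => simp
  | cons x xs ih =>
    rw [List.foldl_cons, pnd_inner, ih]
    simp

-- B's loop body, as a function of k
def pndF (size : Int) (k : Int) : Int × Int :=
  let i := PySem.Int.floordiv k (size - 1)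
  let r := PySem.Int.mod k (size - 1)
  if r < i then (i, r) else (i, r + 1)

-- B's foldl-with-append is a map of pndF
theorem pnd_b_map (size : Int) (l : List Int) (acc : List (Int × Int)) :
    l.foldl (fun out k =>
      let i := PySem.Int.floordiv k (size - 1)
      let r := PySem.Int.mod k (size - 1)
      out ++ [if r < i then (i, r) else (i, r + 1)]) acc
      = acc ++ l.map (pndF size) := by
  induction l generalizing acc with
  | nil => simp
  | cons x xs ih => rw [List.foldl_cons, ih]; simp [pndF]

-- shifting a range: pyRange c (c+b) is pyRange 0 b shifted by c
theorem pnd_range_shift (c b : Int) :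
    PySem.List.pyRange c (c + b) 1 = (PySem.List.pyRange 0 b 1).map (fun r => c + r) := by
  rw [PySem.List.pyRange_one c (c + b), PySem.List.pyRange_one 0 b]
  simp [List.map_map, Function.comp]

-- adding one to every element of a range
theorem pnd_range_succ_map (a b : Int) :
    (PySem.List.pyRange a b 1).map (fun r => r + 1) = PySem.List.pyRange (a + 1) (b + 1) 1 := by
  rw [PySem.List.pyRange_one a b, PySem.List.pyRange_one (a + 1) (b + 1)]
  have : b + 1 - (a + 1) = b - a := by ring
  rw [this]
  simp only [List.map_map]
  exact List.map_congr_left (fun k _ => by simp [Function.comp]; ring)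

-- filtering out one element of a range equals a skip-map over a shorter range
theorem pnd_filter_range (a n : Int) (h0 : 0 ≤ a) (h1 : a < n) :
    (PySem.List.pyRange 0 n 1).filter (fun j => j ≠ a)
      = (PySem.List.pyRange 0 (n - 1) 1).map (fun r => if r < a then r else r + 1) := by
  rw [PySem.List.pyRange_one_append 0 a n h0 (le_of_lt h1),
      PySem.List.pyRange_one_cons h1,
      PySem.List.pyRange_one_append 0 a (n - 1) h0 (by omega)]
  rw [List.filter_append, List.filter_cons]
  simp only [List.map_append]
  have hfirstF : (PySem.List.pyRange 0 a 1).filter (fun j => j ≠ a) = PySem.List.pyRange 0 a 1 := by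
    apply List.filter_eq_self.2
    intro x hx
    have := (PySem.List.mem_pyRange_one).1 hx
    simp; omega
  have hfirstM : (PySem.List.pyRange 0 a 1).map (fun r => if r < a then r else r + 1)
      = PySem.List.pyRange 0 a 1 := by
    rw [List.map_congr_left (g := id) (fun x hx => by
      have := (PySem.List.mem_pyRange_one).1 hx
      simp; omega)]
    exact List.map_id _
  have htailF : (PySem.List.pyRange (a + 1) n 1).filter (fun j => j ≠ a)
      = PySem.List.pyRange (a + 1) n 1 := by
    apply List.filter_eq_self.2
    intro x hx
    have := (PySem.List.mem_pyRange_one).1 hx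
    simp; omega
  have htailM : (PySem.List.pyRange a (n - 1) 1).map (fun r => if r < a then r else r + 1)
      = PySem.List.pyRange (a + 1) n 1 := by
    rw [List.map_congr_left (g := fun r => r + 1) (fun x hx => by
      have := (PySem.List.mem_pyRange_one).1 hx
      simp; omega)]
    rw [pnd_range_succ_map]
    congr 1; ring
  rw [hfirstF, htailF, hfirstM, htailM]
  simp

-- decoding one block: for a*b ≤ k < a*b + b (0 < b), divmod gives (a, k - a*b)
theorem pnd_block (n a : Int) (hb : 0 < n - 1) (h0 : 0 ≤ a) (han : a < n) :
    (PySem.List.pyRange (a * (n - 1)) (a * (n - 1) + (n - 1)) 1).map (pndF n)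
      = ((PySem.List.pyRange 0 n 1).filter (fun j => j ≠ a)).map (fun j => (a, j)) := by
  rw [pnd_filter_range a n h0 han, pnd_range_shift (a * (n - 1)) (n - 1), List.map_map,
      List.map_map]
  apply List.map_congr_left
  intro r hr
  have hrb := (PySem.List.mem_pyRange_one).1 hr
  have hdiv : PySem.Int.floordiv (a * (n - 1) + r) (n - 1) = a := by
    rw [PySem.Int.floordiv_eq_iff_of_pos hb]
    constructor <;> nlinarith
  have hmod : PySem.Int.mod (a * (n - 1) + r) (n - 1) = r := by
    have := PySem.Int.floordiv_mul_add_mod (a * (n - 1) + r) (n - 1)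
    rw [hdiv] at this; omega
  simp only [Function.comp, pndF, hdiv, hmod]
  by_cases hra : r < a <;> simp [hra]

-- the whole flat range, block by block
theorem pnd_main (n : Int) (hb : 0 < n - 1) :
    ∀ (a : Nat), (a : Int) ≤ n →
      (PySem.List.pyRange 0 ((a : Int) * (n - 1)) 1).map (pndF n)
        = (PySem.List.pyRange 0 (a : Int) 1).flatMap
            (fun i => ((PySem.List.pyRange 0 n 1).filter (fun j => j ≠ i)).map (fun j => (i, j))) := by
  intro a
  induction a with
  | zero => intro _; simp [PySem.List.pyRange_one_eq_nil]
  | succ a ih =>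
    intro hle
    have ha : ((a : Int) + 1) ≤ n := by push_cast at hle ⊢; omega
    have hcast : ((a + 1 : Nat) : Int) = (a : Int) + 1 := by push_cast; ring
    rw [hcast]
    have hsplit : PySem.List.pyRange 0 (((a : Int) + 1) * (n - 1)) 1
        = PySem.List.pyRange 0 ((a : Int) * (n - 1)) 1
          ++ PySem.List.pyRange ((a : Int) * (n - 1)) ((a : Int) * (n - 1) + (n - 1)) 1 := by
      have h2 : ((a : Int) + 1) * (n - 1) = (a : Int) * (n - 1) + (n - 1) := by ring
      rw [h2]
      exact PySem.List.pyRange_one_append 0 ((a : Int) * (n - 1)) _ (by positivity) (by omega)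
    rw [hsplit, List.map_append, ih (by omega),
        PySem.List.pyRange_one_succ_right (by positivity), List.flatMap_append]
    simp only [List.flatMap_cons, List.flatMap_nil, List.append_nil]
    rw [pnd_block n (a : Int) hb (by positivity) (by omega)]

-- ===== VERDICT =====
theorem pairwise_non_diagonal_to_list_spec : Claim_equal_pairwise_non_diagonal_to_list := by
  intro size _
  unfold Spec_pairwise_non_diagonal_to_list pairwise_non_diagonal_to_list
    pairwise_non_diagonal_to_list_alt
  rw [pnd_outer]
  simp only [List.nil_append]
  by_cases hs : size < 2
  · rw [if_pos hs]
    by_cases h0 : size ≤ 0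
    · rw [PySem.List.pyRange_one_eq_nil h0]; simp
    · have : size = 1 := by omega
      subst this; decide
  · rw [if_neg hs, pnd_b_map]
    simp only [List.nil_append]
    have hb : 0 < size - 1 := by omega
    have hcast : ((size.toNat : Nat) : Int) = size := by omega
    have := pnd_main size hb size.toNat (by omega)
    rw [hcast] at this
    rw [this]
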